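-- pv_equiv track=rewrite | github.com/ZihanLi99/ZihanLi | row_puzzle.py | row_puzzle_rec
-- ===== SOURCE A (Python) =====
-- def row_puzzle_rec(row, i, visited):
--     if i < 0:
--         # out of range
--         return False
--     if i >= len(row):
--         # out of range
--         return False
--     if i == len(row) - 1:
--         # reach last column
--         return True
--
--     steps = row[i]
--     visited.add(i)
--     # mark as visited
--
--     if (i - steps) not in visited:
--         if row_puzzle_rec(row, i - steps, visited):
--             # try an unvisited column (left)
--             return True
--
--     if (i + steps) not in visited:
--         if row_puzzle_rec(row, i + steps, visited):
--             # try an unvisited column (right)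
--             return True
--     return False
-- ===== SOURCE B (Python) =====
-- def row_puzzle_rec(row, i, visited):
--     # Iterative worklist saturation instead of recursion (return value only;
--     # like A it mutates `visited`, though the final contents may differ on early exit).
--     n = len(row)
--     if i < 0 or i >= n:
--         return False
--     if i == n - 1:
--         return True
--     reach = {i}
--     frontier = [i]
--     while frontier:
--         j = frontier.pop()
--         visited.add(j)
--         s = row[j]
--         for nxt in (j - s, j + s):
--             if nxt in visited or nxt in reach:
--                 continue
--             if nxt == n - 1:
--                 return True
--             if 0 <= nxt < n:
--                 reach.add(nxt)
--                 frontier.append(nxt)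
--     return False
-- ===== Notes on version B (the rewrite author's own statement) =====
-- stated objective: alternative
-- what changed: The recursive left-then-right DFS with a mutated visited set is replaced by an iterative worklist saturation: a frontier stack plus a 'reach' set of discovered interior columns, returning True as soon as a neighbour is the last column; return value is identical, the in-place mutation of `visited` may leave different final contents and deep recursion is avoided.
import Mathlib
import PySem

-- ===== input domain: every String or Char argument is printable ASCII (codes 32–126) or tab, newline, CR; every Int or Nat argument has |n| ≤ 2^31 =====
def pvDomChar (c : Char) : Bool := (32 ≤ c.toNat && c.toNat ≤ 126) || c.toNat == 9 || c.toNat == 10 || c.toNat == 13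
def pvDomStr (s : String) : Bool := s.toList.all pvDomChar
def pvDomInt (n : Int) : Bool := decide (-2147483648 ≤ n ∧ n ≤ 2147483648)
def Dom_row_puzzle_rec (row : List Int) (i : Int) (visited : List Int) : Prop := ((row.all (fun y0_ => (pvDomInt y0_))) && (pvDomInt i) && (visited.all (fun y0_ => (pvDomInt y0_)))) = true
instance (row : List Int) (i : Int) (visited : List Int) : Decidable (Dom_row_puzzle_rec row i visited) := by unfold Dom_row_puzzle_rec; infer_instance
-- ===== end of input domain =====

-- B replaces A's recursive DFS by an iterative worklist saturation; the equivalence proved is about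
-- the RETURN value only (both mutate the Python `visited` set, possibly with different final contents).

-- row[j] for an index known to be in range (exact there; out of range never reached)
def getI (row : List Int) (j : Int) : Int := (PySem.List.pyGet? row j).getD 0

-- number of indices in [0, m) not yet in the set v (termination/fuel measure)
def unvisCnt (m : Nat) (v : PySem.Set Int) : Nat :=
  (List.range m).countP (fun k : Nat => !(decide ((k : Int) ∈ v)))

-- ===== PORT A =====
-- literal transliteration of A's recursion; the Python set `visited` is threaded through,
-- fuel (row.length + 2 at top level) only makes the recursion total — it provably never runs out
def goA (row : List Int) (fuel : Nat) (i : Int) (visited : PySem.Set Int) : Bool × PySem.Set Int :=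
  match fuel with
  | 0 => (false, visited)
  | Nat.succ f =>
    if i < 0 then (false, visited)
    else if (row.length : Int) ≤ i then (false, visited)
    else if i = (row.length : Int) - 1 then (true, visited)
    else
      let steps := getI row i
      let v1 := PySem.Set.add visited i
      if (i - steps) ∈ v1 then
        (if (i + steps) ∈ v1 then (false, v1) else goA row f (i + steps) v1)
      else
        let p := goA row f (i - steps) v1
        if p.1 then p
        else if (i + steps) ∈ p.2 then (false, p.2) else goA row f (i + steps) p.2

def row_puzzle_rec (row : List Int) (i : Int) (visited : List Int) : Bool :=
  (goA row (row.length + 2) i (PySem.Set.ofList visited)).1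

-- ===== PORT B =====
-- one child step of B's inner for-loop: none = "return True", some = updated (reach, frontier)
def pushChild (n : Int) (visited reach : PySem.Set Int) (frontier : List Int) (c : Int) :
    Option (PySem.Set Int × List Int) :=
  if c ∈ visited ∨ c ∈ reach then some (reach, frontier)
  else if c = n - 1 then none
  else if 0 ≤ c ∧ c < n then some (PySem.Set.add reach c, c :: frontier)
  else some (reach, frontier)

theorem countP_add_le (t : List Nat) (r : PySem.Set Int) (c : Int) :
    t.countP (fun k : Nat => !(decide ((k : Int) ∈ PySem.Set.add r c)))
      ≤ t.countP (fun k : Nat => !(decide ((k : Int) ∈ r))) := by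
  apply List.countP_mono_left
  intro a _ ha
  simp only [Bool.not_eq_true', decide_eq_false_iff_not] at ha ⊢
  intro hmem; exact ha ((PySem.Set.mem_add _ _ _).mpr (Or.inl hmem))

theorem countP_add_lt (t : List Nat) (r : PySem.Set Int) (c : Int) (hc : c ∉ r)
    (hmem : c.toNat ∈ t) (hcc : (c.toNat : Int) = c) :
    t.countP (fun k : Nat => !(decide ((k : Int) ∈ PySem.Set.add r c)))
      < t.countP (fun k : Nat => !(decide ((k : Int) ∈ r))) := by
  induction t with
  | nil => exact absurd hmem List.not_mem_nil
  | cons a t ih =>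
    rw [List.countP_cons, List.countP_cons]
    rcases List.mem_cons.mp hmem with hh | ht
    · have e1 : (!(decide ((a : Int) ∈ PySem.Set.add r c))) = false := by
        have hmemadd : (a : Int) ∈ PySem.Set.add r c :=
          (PySem.Set.mem_add _ _ _).mpr (Or.inr (show (a : Int) = c by omega))
        simp [hmemadd]
      have e2 : (!(decide ((a : Int) ∈ r))) = true := by
        simp only [Bool.not_eq_eq_eq_not, Bool.not_true, decide_eq_false_iff_not]
        have : (a : Int) = c := by omega
        rw [this]; exact hc
      rw [e1, e2, if_neg Bool.false_ne_true, if_pos rfl]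
      have := countP_add_le t r c
      omega
    · have ht' := ih ht
      by_cases hpa : (!(decide ((a : Int) ∈ PySem.Set.add r c))) = true
      · have hnotadd : (a : Int) ∉ PySem.Set.add r c := by simpa using hpa
        have hqa : (!(decide ((a : Int) ∈ r))) = true := by
          have : (a : Int) ∉ r := fun hm => hnotadd ((PySem.Set.mem_add _ _ _).mpr (Or.inl hm))
          simpa using this
        rw [if_pos hpa, if_pos hqa]
        omega
      · rw [if_neg hpa]
        split_ifs <;> omega

theorem pushChild_measure {n : Int} {w r : PySem.Set Int} {f : List Int} {c : Int}
    {r' : PySem.Set Int} {f' : List Int} (m : Nat) (hm : (m : Int) = n)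
    (h : pushChild n w r f c = some (r', f')) :
    2 * unvisCnt m r' + f'.length ≤ 2 * unvisCnt m r + f.length := by
  unfold pushChild at h
  split_ifs at h with h1 h2 h3
  · cases h; omega
  · cases h
    have hcr : c ∉ r := fun hx => h1 (Or.inr hx)
    have hstep : unvisCnt m (PySem.Set.add r c) < unvisCnt m r := by
      apply countP_add_lt _ _ _ hcr
      · exact List.mem_range.mpr (by omega)
      · omega
    simp only [List.length_cons]
    omega
  · cases h; omega

def goB (row : List Int) (visited reach : PySem.Set Int) (frontier : List Int) : Bool :=
  match frontier with
  | [] => false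
  | j :: rest =>
    match h1 : pushChild (row.length : Int) (PySem.Set.add visited j) reach rest (j - getI row j) with
    | none => true
    | some (r1, f1) =>
      match h2 : pushChild (row.length : Int) (PySem.Set.add visited j) r1 f1 (j + getI row j) with
      | none => true
      | some (r2, f2) => goB row (PySem.Set.add visited j) r2 f2
  termination_by 2 * unvisCnt row.length reach + frontier.length
  decreasing_by
    have e1 := pushChild_measure (f := rest) row.length rfl h1
    have e2 := pushChild_measure (f := f1) row.length rfl h2
    simp only [List.length_cons]
    omega

def row_puzzle_rec_alt (row : List Int) (i : Int) (visited : List Int) : Bool :=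
  if i < 0 ∨ (row.length : Int) ≤ i then false
  else if i = (row.length : Int) - 1 then true
  else goB row (PySem.Set.ofList visited) (PySem.Set.ofList [i]) [i]

-- ===== PRECONDITION & SPEC =====
def Spec_row_puzzle_rec (row : List Int) (i : Int) (visited : List Int) (out : Bool) : Prop := out = row_puzzle_rec_alt row i visited
instance (row : List Int) (i : Int) (visited : List Int) (out : Bool) : Decidable (Spec_row_puzzle_rec row i visited out) := by unfold Spec_row_puzzle_rec; infer_instance

-- ===== CLAIM (what is proved, stated in full; the proofs are below) =====
def Claim_equal_row_puzzle_rec : Prop := ∀ (row : List Int) (i : Int) (visited : List Int), Dom_row_puzzle_rec row i visited → Spec_row_puzzle_rec row i visited (row_puzzle_rec row i visited)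

-- ===== LEMMAS AND PROOFS =====

-- a path x = x0 → x1 → … → last column; every node after the head is not in v
def okPath (row : List Int) (v : PySem.Set Int) : Int → List Int → Prop
  | x, [] => x = (row.length : Int) - 1 ∧ 0 ≤ x
  | x, y :: ys => 0 ≤ x ∧ x < (row.length : Int) - 1 ∧
      (y = x - getI row x ∨ y = x + getI row x) ∧ y ∉ v ∧ okPath row v y ys

theorem okPath_nil (row : List Int) (v : PySem.Set Int) (x : Int) :
    okPath row v x [] ↔ x = (row.length : Int) - 1 ∧ 0 ≤ x := Iff.rfl

theorem okPath_cons (row : List Int) (v : PySem.Set Int) (x y : Int) (ys : List Int) :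
    okPath row v x (y :: ys) ↔ 0 ≤ x ∧ x < (row.length : Int) - 1 ∧
      (y = x - getI row x ∨ y = x + getI row x) ∧ y ∉ v ∧ okPath row v y ys := Iff.rfl

-- nodes reachable from i through interior, unblocked columns
inductive RchFrom (row : List Int) (v : PySem.Set Int) (i : Int) : Int → Prop where
  | base : RchFrom row v i i
  | step (x c : Int) : RchFrom row v i x → 0 ≤ x → x < (row.length : Int) - 1 →
      (c = x - getI row x ∨ c = x + getI row x) → c ∉ v → 0 ≤ c → c < (row.length : Int) - 1 →
      RchFrom row v i c

theorem okPath_anti (row : List Int) {v w : PySem.Set Int} (hvw : ∀ x, x ∈ v → x ∈ w) :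
    ∀ xs x, okPath row w x xs → okPath row v x xs := by
  intro xs
  induction xs with
  | nil => intro x h; exact h
  | cons y ys ih =>
    intro x h
    rw [okPath_cons] at h ⊢
    rcases h with ⟨a, b, c, d, e⟩
    exact ⟨a, b, c, fun hy => d (hvw y hy), ih y e⟩

theorem rch_ok (row : List Int) (v : PySem.Set Int) (i : Int) :
    ∀ x, RchFrom row v i x → ∀ zs, okPath row v x zs → ∃ ys, okPath row v i ys := by
  intro x h
  induction h with
  | base => intro zs hz; exact ⟨zs, hz⟩
  | step x c _ h0 h1 hch hcv _ _ ih =>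
    intro zs hz
    exact ih (c :: zs) ((okPath_cons row v x c zs).mpr ⟨h0, h1, hch, hcv, hz⟩)

-- a set of interior columns closed under moves (modulo v) admits no path to the last column
theorem closed_no_path (row : List Int) (v : PySem.Set Int) (S : Int → Prop)
    (hint : ∀ j, S j → 0 ≤ j ∧ j < (row.length : Int) - 1)
    (hclo : ∀ j, S j → ∀ c, (c = j - getI row j ∨ c = j + getI row j) → c ∉ v →
        c ≠ (row.length : Int) - 1 ∧ (0 ≤ c → c < (row.length : Int) - 1 → S c)) :
    ∀ xs x, S x → okPath row v x xs → False := by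
  intro xs
  induction xs with
  | nil =>
    intro x hS hok
    rw [okPath_nil] at hok
    have := hint x hS
    omega
  | cons y ys ih =>
    intro x hS hok
    rw [okPath_cons] at hok
    rcases hok with ⟨_, _, hchild, hyv, hok'⟩
    rcases hclo x hS y hchild hyv with ⟨hne, hnext⟩
    cases ys with
    | nil => exact hne ((okPath_nil row v y).mp hok').1
    | cons z zs =>
      have h2 := (okPath_cons row v y z zs).mp hok'
      exact ih y (hnext h2.1 h2.2.1) hok'

-- ---------- A-side lemmas ----------

theorem goA_zero (row : List Int) (i : Int) (v : PySem.Set Int) : goA row 0 i v = (false, v) := rfl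

theorem goA_succ (row : List Int) (f : Nat) (i : Int) (v : PySem.Set Int) : goA row (f + 1) i v =
    if i < 0 then (false, v)
    else if (row.length : Int) ≤ i then (false, v)
    else if i = (row.length : Int) - 1 then (true, v)
    else
      if (i - getI row i) ∈ PySem.Set.add v i then
        (if (i + getI row i) ∈ PySem.Set.add v i then (false, PySem.Set.add v i)
         else goA row f (i + getI row i) (PySem.Set.add v i))
      else
        (if (goA row f (i - getI row i) (PySem.Set.add v i)).1 then
           goA row f (i - getI row i) (PySem.Set.add v i)
         else if (i + getI row i) ∈ (goA row f (i - getI row i) (PySem.Set.add v i)).2 then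
           (false, (goA row f (i - getI row i) (PySem.Set.add v i)).2)
         else goA row f (i + getI row i) (goA row f (i - getI row i) (PySem.Set.add v i)).2) := rfl

theorem goA_supset (row : List Int) :
    ∀ f i v x, x ∈ v → x ∈ (goA row f i v).2 := by
  intro f
  induction f with
  | zero => intro i v x hx; exact hx
  | succ f ih =>
    intro i v x hx
    rw [goA_succ]
    have hx1 : x ∈ PySem.Set.add v i := (PySem.Set.mem_add _ _ _).mpr (Or.inl hx)
    split_ifs with g1 g2 g3 g4 g5 g6 g7
    · exact hx
    · exact hx
    · exact hx
    · exact hx1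
    · exact ih _ _ _ hx1
    · exact ih _ _ _ hx1
    · exact ih _ _ _ hx1
    · exact ih _ _ _ (ih _ _ _ hx1)

theorem goA_new (row : List Int) :
    ∀ f i v x, x ∈ (goA row f i v).2 → x ∈ v ∨ (0 ≤ x ∧ x < (row.length : Int) - 1) := by
  intro f
  induction f with
  | zero => intro i v x hx; exact Or.inl hx
  | succ f ih =>
    intro i v x hx
    rw [goA_succ] at hx
    split_ifs at hx with g1 g2 g3 g4 g5 g6 g7
    · exact Or.inl hx
    · exact Or.inl hx
    · exact Or.inl hx
    · rcases (PySem.Set.mem_add _ _ _).mp hx with h | h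
      · exact Or.inl h
      · subst h; right; omega
    · rcases ih _ _ _ hx with h | h
      · rcases (PySem.Set.mem_add _ _ _).mp h with h' | h'
        · exact Or.inl h'
        · subst h'; right; omega
      · exact Or.inr h
    · rcases ih _ _ _ hx with h | h
      · rcases (PySem.Set.mem_add _ _ _).mp h with h' | h'
        · exact Or.inl h'
        · subst h'; right; omega
      · exact Or.inr h
    · rcases ih _ _ _ hx with h | h
      · rcases (PySem.Set.mem_add _ _ _).mp h with h' | h'
        · exact Or.inl h'
        · subst h'; right; omega
      · exact Or.inr h
    · rcases ih _ _ _ hx with h | h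
      · rcases ih _ _ _ h with h' | h'
        · rcases (PySem.Set.mem_add _ _ _).mp h' with h'' | h''
          · exact Or.inl h''
          · subst h''; right; omega
        · exact Or.inr h'
      · exact Or.inr h

theorem goA_self (row : List Int) (f : Nat) (i : Int) (v : PySem.Set Int)
    (hf : 0 < f) (h0 : 0 ≤ i) (h1 : i < (row.length : Int) - 1) :
    i ∈ (goA row f i v).2 := by
  obtain ⟨f', rfl⟩ : ∃ f', f = f' + 1 := ⟨f - 1, by omega⟩
  rw [goA_succ]
  have hmem : i ∈ PySem.Set.add v i := (PySem.Set.mem_add _ _ _).mpr (Or.inr rfl)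
  split_ifs with g1 g2 g3 g4 g5 g6 g7
  · exact absurd g1 (by omega)
  · exact absurd g2 (by omega)
  · exact absurd g3 (by omega)
  · exact hmem
  · exact goA_supset row _ _ _ _ hmem
  · exact goA_supset row _ _ _ _ hmem
  · exact goA_supset row _ _ _ _ hmem
  · exact goA_supset row _ _ _ _ (goA_supset row _ _ _ _ hmem)

theorem goA_target (row : List Int) (f : Nat) (i : Int) (v : PySem.Set Int)
    (hf : 0 < f) (h0 : 0 ≤ i) (h1 : i = (row.length : Int) - 1) :
    (goA row f i v).1 = true := by
  obtain ⟨f', rfl⟩ : ∃ f', f = f' + 1 := ⟨f - 1, by omega⟩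
  rw [goA_succ, if_neg (by omega : ¬ i < 0), if_neg (by omega : ¬ (row.length : Int) ≤ i),
    if_pos h1]

theorem goA_sound (row : List Int) :
    ∀ f i v, (goA row f i v).1 = true → ∃ xs, okPath row v i xs := by
  intro f
  induction f with
  | zero => intro i v h; exact absurd h (by simp [goA_zero])
  | succ f ih =>
    intro i v h
    rw [goA_succ] at h
    by_cases h1 : i < 0
    · rw [if_pos h1] at h; exact absurd h (by simp)
    · rw [if_neg h1] at h
      by_cases h2 : (row.length : Int) ≤ i
      · rw [if_pos h2] at h; exact absurd h (by simp)
      · rw [if_neg h2] at h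
        by_cases h3 : i = (row.length : Int) - 1
        · exact ⟨[], (okPath_nil row v i).mpr ⟨h3, by omega⟩⟩
        · rw [if_neg h3] at h
          by_cases h4 : (i - getI row i) ∈ PySem.Set.add v i
          · rw [if_pos h4] at h
            by_cases h5 : (i + getI row i) ∈ PySem.Set.add v i
            · rw [if_pos h5] at h; exact absurd h (by simp)
            · rw [if_neg h5] at h
              rcases ih _ _ h with ⟨xs, hxs⟩
              refine ⟨(i + getI row i) :: xs, (okPath_cons row v _ _ _).mpr
                ⟨by omega, by omega, Or.inr rfl, ?_, ?_⟩⟩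
              · intro hmem; exact h5 ((PySem.Set.mem_add _ _ _).mpr (Or.inl hmem))
              · exact okPath_anti row (fun x hx => (PySem.Set.mem_add _ _ _).mpr (Or.inl hx))
                  xs _ hxs
          · rw [if_neg h4] at h
            by_cases h6 : (goA row f (i - getI row i) (PySem.Set.add v i)).1 = true
            · rcases ih _ _ h6 with ⟨xs, hxs⟩
              refine ⟨(i - getI row i) :: xs, (okPath_cons row v _ _ _).mpr
                ⟨by omega, by omega, Or.inl rfl, ?_, ?_⟩⟩
              · intro hmem; exact h4 ((PySem.Set.mem_add _ _ _).mpr (Or.inl hmem))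
              · exact okPath_anti row (fun x hx => (PySem.Set.mem_add _ _ _).mpr (Or.inl hx))
                  xs _ hxs
            · rw [if_neg h6] at h
              by_cases h7 : (i + getI row i) ∈ (goA row f (i - getI row i) (PySem.Set.add v i)).2
              · rw [if_pos h7] at h; exact absurd h (by simp)
              · rw [if_neg h7] at h
                rcases ih _ _ h with ⟨xs, hxs⟩
                have hsub : ∀ x, x ∈ v → x ∈ (goA row f (i - getI row i) (PySem.Set.add v i)).2 :=
                  fun x hx => goA_supset row _ _ _ _ ((PySem.Set.mem_add _ _ _).mpr (Or.inl hx))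
                refine ⟨(i + getI row i) :: xs, (okPath_cons row v _ _ _).mpr
                  ⟨by omega, by omega, Or.inr rfl, ?_, ?_⟩⟩
                · intro hmem; exact h7 (hsub _ hmem)
                · exact okPath_anti row hsub xs _ hxs

theorem unvisCnt_le (m : Nat) (v : PySem.Set Int) : unvisCnt m v ≤ m := by
  unfold unvisCnt
  refine le_trans List.countP_le_length ?_
  simp

theorem unvisCnt_mono (m : Nat) {v w : PySem.Set Int} (h : ∀ x, x ∈ v → x ∈ w) :
    unvisCnt m w ≤ unvisCnt m v := by
  apply List.countP_mono_left
  intro a _ ha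
  simp only [Bool.not_eq_true', decide_eq_false_iff_not] at ha ⊢
  intro hmem; exact ha (h _ hmem)

def childOK (row : List Int) (w : PySem.Set Int) (c : Int) : Prop :=
  c ∈ w ∨ c < 0 ∨ (row.length : Int) ≤ c

theorem childOK_mono (row : List Int) {w w' : PySem.Set Int} (h : ∀ x, x ∈ w → x ∈ w') {c : Int}
    (hc : childOK row w c) : childOK row w' c := by
  rcases hc with h1 | h1
  · exact Or.inl (h _ h1)
  · exact Or.inr h1

theorem goA_closed (row : List Int) :
    ∀ f i v,
      unvisCnt row.length v + (if i ∈ v then 2 else 1) ≤ f →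
      (goA row f i v).1 = false →
      ∀ j, (j = i ∨ (j ∈ (goA row f i v).2 ∧ j ∉ v)) → 0 ≤ j → j < (row.length : Int) - 1 →
        childOK row (goA row f i v).2 (j - getI row j) ∧
        childOK row (goA row f i v).2 (j + getI row j) := by
  intro f
  induction f with
  | zero =>
    intro i v hfuel
    exfalso
    have h1 : (1:Nat) ≤ if i ∈ v then 2 else 1 := by split_ifs <;> omega
    omega
  | succ f ih =>
    intro i v hfuel hfalse j hj hj0 hj1
    rw [goA_succ] at hfalse hj ⊢
    by_cases h1 : i < 0
    · rw [if_pos h1] at hfalse hj ⊢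
      rcases hj with rfl | ⟨hjm, hnv⟩
      · omega
      · exact absurd hjm hnv
    · rw [if_neg h1] at hfalse hj ⊢
      by_cases h2 : (row.length : Int) ≤ i
      · rw [if_pos h2] at hfalse hj ⊢
        rcases hj with rfl | ⟨hjm, hnv⟩
        · omega
        · exact absurd hjm hnv
      · rw [if_neg h2] at hfalse hj ⊢
        by_cases h3 : i = (row.length : Int) - 1
        · rw [if_pos h3] at hfalse; exact absurd hfalse (by simp)
        · rw [if_neg h3] at hfalse hj ⊢
          have hi0 : 0 ≤ i := by omega
          have hi1 : i < (row.length : Int) - 1 := by omega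
          have hK : unvisCnt row.length (PySem.Set.add v i) + 1 ≤ f := by
            by_cases hiv : i ∈ v
            · have hle : unvisCnt row.length (PySem.Set.add v i) ≤ unvisCnt row.length v :=
                unvisCnt_mono _ (fun x hx => (PySem.Set.mem_add _ _ _).mpr (Or.inl hx))
              rw [if_pos hiv] at hfuel
              omega
            · have hlt : unvisCnt row.length (PySem.Set.add v i) < unvisCnt row.length v := by
                apply countP_add_lt _ _ _ hiv
                · exact List.mem_range.mpr (by omega)
                · omega
              rw [if_neg hiv] at hfuel
              omega
          have hv1cases : ∀ x, x ∈ PySem.Set.add v i → x ∈ v ∨ x = i :=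
            fun x hx => (PySem.Set.mem_add _ _ _).mp hx
          by_cases hL : (i - getI row i) ∈ PySem.Set.add v i
          · rw [if_pos hL] at hfalse hj ⊢
            by_cases hR : (i + getI row i) ∈ PySem.Set.add v i
            · rw [if_pos hR] at hfalse hj ⊢
              have hIcase : childOK row (PySem.Set.add v i) (i - getI row i) ∧
                  childOK row (PySem.Set.add v i) (i + getI row i) := ⟨Or.inl hL, Or.inl hR⟩
              rcases hj with rfl | ⟨hjm, hnv⟩
              · exact hIcase
              · rcases hv1cases _ hjm with h | h
                · exact absurd h hnv
                · subst h; exact hIcase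
            · rw [if_neg hR] at hfalse hj ⊢
              have hfq : unvisCnt row.length (PySem.Set.add v i) +
                  (if (i + getI row i) ∈ PySem.Set.add v i then 2 else 1) ≤ f := by
                rw [if_neg hR]; omega
              have IH := ih (i + getI row i) (PySem.Set.add v i) hfq hfalse
              have hsubq : ∀ x, x ∈ PySem.Set.add v i →
                  x ∈ (goA row f (i + getI row i) (PySem.Set.add v i)).2 :=
                fun x hx => goA_supset row _ _ _ _ hx
              have hRok : childOK row (goA row f (i + getI row i) (PySem.Set.add v i)).2
                  (i + getI row i) := by
                by_cases hc1 : (i + getI row i) < 0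
                · exact Or.inr (Or.inl hc1)
                · by_cases hc2 : (row.length : Int) ≤ (i + getI row i)
                  · exact Or.inr (Or.inr hc2)
                  · by_cases hc3 : (i + getI row i) = (row.length : Int) - 1
                    · exact absurd hfalse (by
                        rw [goA_target row f (i + getI row i) (PySem.Set.add v i)
                          (by omega) (by omega) hc3]
                        simp)
                    · exact Or.inl (goA_self row f _ _ (by omega) (by omega) (by omega))
              have hIcase : childOK row (goA row f (i + getI row i) (PySem.Set.add v i)).2
                  (i - getI row i) ∧
                  childOK row (goA row f (i + getI row i) (PySem.Set.add v i)).2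
                  (i + getI row i) := ⟨Or.inl (hsubq _ hL), hRok⟩
              rcases hj with rfl | ⟨hjm, hnv⟩
              · exact hIcase
              · by_cases hjv1 : j ∈ PySem.Set.add v i
                · rcases hv1cases _ hjv1 with h | h
                  · exact absurd h hnv
                  · subst h; exact hIcase
                · exact IH j (Or.inr ⟨hjm, hjv1⟩) hj0 hj1
          · rw [if_neg hL] at hfalse hj ⊢
            have hfL : unvisCnt row.length (PySem.Set.add v i) +
                (if (i - getI row i) ∈ PySem.Set.add v i then 2 else 1) ≤ f := by
              rw [if_neg hL]; omega
            by_cases hp : (goA row f (i - getI row i) (PySem.Set.add v i)).1 = true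
            · rw [if_pos hp] at hfalse
              rw [hp] at hfalse
              exact absurd hfalse (by simp)
            · rw [if_neg hp] at hfalse hj ⊢
              have hpf : (goA row f (i - getI row i) (PySem.Set.add v i)).1 = false := by
                simpa using hp
              have IHL := ih (i - getI row i) (PySem.Set.add v i) hfL hpf
              have hsubL : ∀ x, x ∈ PySem.Set.add v i →
                  x ∈ (goA row f (i - getI row i) (PySem.Set.add v i)).2 :=
                fun x hx => goA_supset row _ _ _ _ hx
              have hLok : childOK row (goA row f (i - getI row i) (PySem.Set.add v i)).2
                  (i - getI row i) := by
                by_cases hc1 : (i - getI row i) < 0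
                · exact Or.inr (Or.inl hc1)
                · by_cases hc2 : (row.length : Int) ≤ (i - getI row i)
                  · exact Or.inr (Or.inr hc2)
                  · by_cases hc3 : (i - getI row i) = (row.length : Int) - 1
                    · exact absurd hpf (by
                        rw [goA_target row f (i - getI row i) (PySem.Set.add v i)
                          (by omega) (by omega) hc3]
                        simp)
                    · exact Or.inl (goA_self row f _ _ (by omega) (by omega) (by omega))
              by_cases hR : (i + getI row i) ∈ (goA row f (i - getI row i) (PySem.Set.add v i)).2
              · rw [if_pos hR] at hfalse hj ⊢
                have hIcase : childOK row (goA row f (i - getI row i) (PySem.Set.add v i)).2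
                    (i - getI row i) ∧
                    childOK row (goA row f (i - getI row i) (PySem.Set.add v i)).2
                    (i + getI row i) := ⟨hLok, Or.inl hR⟩
                rcases hj with rfl | ⟨hjm, hnv⟩
                · exact hIcase
                · by_cases hjv1 : j ∈ PySem.Set.add v i
                  · rcases hv1cases _ hjv1 with h | h
                    · exact absurd h hnv
                    · subst h; exact hIcase
                  · exact IHL j (Or.inr ⟨hjm, hjv1⟩) hj0 hj1
              · rw [if_neg hR] at hfalse hj ⊢
                have hKw : unvisCnt row.length (goA row f (i - getI row i) (PySem.Set.add v i)).2 +
                    (if (i + getI row i) ∈ (goA row f (i - getI row i) (PySem.Set.add v i)).2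
                     then 2 else 1) ≤ f := by
                  rw [if_neg hR]
                  have := unvisCnt_mono row.length hsubL
                  omega
                have IHR := ih (i + getI row i)
                  (goA row f (i - getI row i) (PySem.Set.add v i)).2 hKw hfalse
                have hsubR : ∀ x, x ∈ (goA row f (i - getI row i) (PySem.Set.add v i)).2 →
                    x ∈ (goA row f (i + getI row i)
                      (goA row f (i - getI row i) (PySem.Set.add v i)).2).2 :=
                  fun x hx => goA_supset row _ _ _ _ hx
                have hRok : childOK row (goA row f (i + getI row i)
                    (goA row f (i - getI row i) (PySem.Set.add v i)).2).2 (i + getI row i) := by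
                  by_cases hc1 : (i + getI row i) < 0
                  · exact Or.inr (Or.inl hc1)
                  · by_cases hc2 : (row.length : Int) ≤ (i + getI row i)
                    · exact Or.inr (Or.inr hc2)
                    · by_cases hc3 : (i + getI row i) = (row.length : Int) - 1
                      · exact absurd hfalse (by
                          rw [goA_target row f (i + getI row i)
                            (goA row f (i - getI row i) (PySem.Set.add v i)).2
                            (by omega) (by omega) hc3]
                          simp)
                      · exact Or.inl (goA_self row f _ _ (by omega) (by omega) (by omega))
                have hIcase : childOK row (goA row f (i + getI row i)
                    (goA row f (i - getI row i) (PySem.Set.add v i)).2).2 (i - getI row i) ∧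
                    childOK row (goA row f (i + getI row i)
                    (goA row f (i - getI row i) (PySem.Set.add v i)).2).2 (i + getI row i) :=
                  ⟨childOK_mono row hsubR hLok, hRok⟩
                rcases hj with rfl | ⟨hjm, hnv⟩
                · exact hIcase
                · by_cases hjv1 : j ∈ PySem.Set.add v i
                  · rcases hv1cases _ hjv1 with h | h
                    · exact absurd h hnv
                    · subst h; exact hIcase
                  · by_cases hjw : j ∈ (goA row f (i - getI row i) (PySem.Set.add v i)).2
                    · have hcl := IHL j (Or.inr ⟨hjw, hjv1⟩) hj0 hj1
                      exact ⟨childOK_mono row hsubR hcl.1, childOK_mono row hsubR hcl.2⟩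
                    · exact IHR j (Or.inr ⟨hjm, hjw⟩) hj0 hj1

theorem goA_false_nopath (row : List Int) (i : Int) (v : PySem.Set Int)
    (h0 : 0 ≤ i) (h1 : i < (row.length : Int) - 1)
    (hf : (goA row (row.length + 2) i v).1 = false) :
    ∀ xs, ¬ okPath row v i xs := by
  intro xs hok
  have hfuel : unvisCnt row.length v + (if i ∈ v then 2 else 1) ≤ row.length + 2 := by
    have := unvisCnt_le row.length v
    split_ifs <;> omega
  have hclosed := goA_closed row (row.length + 2) i v hfuel hf
  apply closed_no_path row v
    (fun j => (0 ≤ j ∧ j < (row.length : Int) - 1) ∧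
      (j = i ∨ (j ∈ (goA row (row.length + 2) i v).2 ∧ j ∉ v)))
    (fun j hj => hj.1)
    ?_ xs i ⟨⟨h0, h1⟩, Or.inl rfl⟩ hok
  intro j hj c hch hcv
  rcases hj with ⟨⟨hj0, hj1⟩, hjd⟩
  have hcc := hclosed j hjd hj0 hj1
  have hcOK : childOK row (goA row (row.length + 2) i v).2 c := by
    rcases hch with rfl | rfl
    · exact hcc.1
    · exact hcc.2
  rcases hcOK with hcw | hoor
  · rcases goA_new row (row.length + 2) i v c hcw with h | h
    · exact absurd h hcv
    · exact ⟨by omega, fun _ _ => ⟨⟨h.1, h.2⟩, Or.inr ⟨hcw, hcv⟩⟩⟩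
  · refine ⟨?_, fun hc0 hc1 => ?_⟩
    · rcases hoor with h | h <;> omega
    · exfalso; rcases hoor with h | h <;> omega

-- ---------- B-side lemmas ----------

theorem pushChild_none {n : Int} {w r : PySem.Set Int} {f : List Int} {c : Int}
    (h : pushChild n w r f c = none) : c ∉ w ∧ c ∉ r ∧ c = n - 1 := by
  unfold pushChild at h
  split_ifs at h with h1 h2 h3
  exact ⟨fun hx => h1 (Or.inl hx), fun hx => h1 (Or.inr hx), h2⟩

theorem pushChild_rsub {n : Int} {w r : PySem.Set Int} {f : List Int} {c : Int}
    {r' : PySem.Set Int} {f' : List Int} (h : pushChild n w r f c = some (r', f')) :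
    ∀ x, x ∈ r → x ∈ r' := by
  unfold pushChild at h
  split_ifs at h with h1 h2 h3 <;> cases h <;> intro x hx
  · exact hx
  · exact (PySem.Set.mem_add _ _ _).mpr (Or.inl hx)
  · exact hx

theorem pushChild_fsub {n : Int} {w r : PySem.Set Int} {f : List Int} {c : Int}
    {r' : PySem.Set Int} {f' : List Int} (h : pushChild n w r f c = some (r', f')) :
    ∀ x, x ∈ f → x ∈ f' := by
  unfold pushChild at h
  split_ifs at h with h1 h2 h3 <;> cases h <;> intro x hx
  · exact hx
  · exact List.mem_cons_of_mem _ hx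
  · exact hx

theorem pushChild_rnew {n : Int} {w r : PySem.Set Int} {f : List Int} {c : Int}
    {r' : PySem.Set Int} {f' : List Int} (h : pushChild n w r f c = some (r', f')) :
    ∀ x, x ∈ r' → x ∈ r ∨ (x = c ∧ c ∉ w ∧ c ∉ r ∧ c ≠ n - 1 ∧ 0 ≤ c ∧ c < n ∧ x ∈ f') := by
  unfold pushChild at h
  split_ifs at h with h1 h2 h3 <;> cases h <;> intro x hx
  · exact Or.inl hx
  · rcases (PySem.Set.mem_add _ _ _).mp hx with h | h
    · exact Or.inl h
    · exact Or.inr ⟨h, fun hm => h1 (Or.inl hm), fun hm => h1 (Or.inr hm), h2, h3.1, h3.2,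
        by rw [h]; exact List.mem_cons_self⟩
  · exact Or.inl hx

theorem pushChild_fnew {n : Int} {w r : PySem.Set Int} {f : List Int} {c : Int}
    {r' : PySem.Set Int} {f' : List Int} (h : pushChild n w r f c = some (r', f')) :
    ∀ x, x ∈ f' → x ∈ f ∨ x ∈ r' := by
  unfold pushChild at h
  split_ifs at h with h1 h2 h3 <;> cases h <;> intro x hx
  · exact Or.inl hx
  · rcases List.mem_cons.mp hx with h | h
    · exact Or.inr ((PySem.Set.mem_add _ _ _).mpr (Or.inr h))
    · exact Or.inl h
  · exact Or.inl hx

theorem pushChild_closed {n : Int} {w r : PySem.Set Int} {f : List Int} {c : Int}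
    {r' : PySem.Set Int} {f' : List Int} (h : pushChild n w r f c = some (r', f')) :
    c ∈ w ∨ c ∈ r' ∨ c < 0 ∨ n ≤ c := by
  unfold pushChild at h
  split_ifs at h with h1 h2 h3 <;> cases h
  · rcases h1 with h | h
    · exact Or.inl h
    · exact Or.inr (Or.inl h)
  · exact Or.inr (Or.inl ((PySem.Set.mem_add _ _ _).mpr (Or.inr rfl)))
  · rcases lt_or_ge c 0 with h | h
    · exact Or.inr (Or.inr (Or.inl h))
    · refine Or.inr (Or.inr (Or.inr ?_))
      by_contra hn
      exact h3 ⟨h, by omega⟩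

theorem goB_nil (row : List Int) (visited reach : PySem.Set Int) :
    goB row visited reach [] = false := by
  rw [goB]

-- reach closed under moves (modulo visited) ⇒ no path from reach to the last column
theorem closed_end (row : List Int) (v0 : PySem.Set Int) (visited reach : PySem.Set Int)
    (hvr : ∀ x, x ∈ visited → x ∈ v0 ∨ x ∈ reach)
    (hint : ∀ x, x ∈ reach → 0 ≤ x ∧ x < (row.length : Int) - 1)
    (hclo : ∀ j, j ∈ reach → ∀ c, (c = j - getI row j ∨ c = j + getI row j) →
        c ∈ visited ∨ c ∈ reach ∨ c < 0 ∨ (row.length : Int) ≤ c) :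
    ∀ x xs, x ∈ reach → okPath row v0 x xs → False := by
  intro x xs hx hok
  apply closed_no_path row v0 (fun y => y ∈ reach) hint ?_ xs x hx hok
  intro j hj c hch hcv
  rcases hclo j hj c hch with h | h | h
  · rcases hvr c h with h' | h'
    · exact absurd h' hcv
    · have := hint c h'
      exact ⟨by omega, fun _ _ => h'⟩
  · have := hint c h
    exact ⟨by omega, fun _ _ => h⟩
  · have hjint := hint j hj
    refine ⟨?_, fun h0 h1 => ?_⟩
    · rcases h with h | h <;> omega
    · exfalso; rcases h with h | h <;> omega

theorem goB_sound (row : List Int) (v0 : PySem.Set Int) (i : Int) :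
    ∀ k visited reach frontier,
      2 * unvisCnt row.length reach + frontier.length ≤ k →
      (∀ x, x ∈ v0 → x ∈ visited) →
      (∀ x, x ∈ reach → (0 ≤ x ∧ x < (row.length : Int) - 1) ∧ RchFrom row v0 i x) →
      (∀ x, x ∈ frontier → x ∈ reach) →
      goB row visited reach frontier = true → ∃ xs, okPath row v0 i xs := by
  intro k
  induction k with
  | zero =>
    intro visited reach frontier hk hv hr hf htrue
    cases frontier with
    | nil => rw [goB_nil] at htrue; exact absurd htrue (by simp)
    | cons j rest => exfalso; simp only [List.length_cons] at hk; omega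
  | succ k ih =>
    intro visited reach frontier hk hv hr hf htrue
    cases frontier with
    | nil => rw [goB_nil] at htrue; exact absurd htrue (by simp)
    | cons j rest =>
      rw [goB] at htrue
      have hjreach : j ∈ reach := hf j List.mem_cons_self
      have hjint := (hr j hjreach).1
      have hjrch := (hr j hjreach).2
      have hvj : ∀ x, x ∈ v0 → x ∈ PySem.Set.add visited j :=
        fun x hx => (PySem.Set.mem_add _ _ _).mpr (Or.inl (hv x hx))
      split at htrue
      · rename_i hpc1
        rcases pushChild_none hpc1 with ⟨hcw, _, hct⟩
        have hcv0 : (j - getI row j) ∉ v0 := fun hx => hcw (hvj _ hx)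
        exact rch_ok row v0 i j hjrch [j - getI row j] ((okPath_cons row v0 _ _ _).mpr
          ⟨hjint.1, hjint.2, Or.inl rfl, hcv0, (okPath_nil row v0 _).mpr ⟨hct, by omega⟩⟩)
      · rename_i r1 f1 hpc1
        split at htrue
        · rename_i hpc2
          rcases pushChild_none hpc2 with ⟨hcw, _, hct⟩
          have hcv0 : (j + getI row j) ∉ v0 := fun hx => hcw (hvj _ hx)
          exact rch_ok row v0 i j hjrch [j + getI row j] ((okPath_cons row v0 _ _ _).mpr
            ⟨hjint.1, hjint.2, Or.inr rfl, hcv0, (okPath_nil row v0 _).mpr ⟨hct, by omega⟩⟩)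
        · rename_i r2 f2 hpc2
          have hm1 := pushChild_measure (f := rest) row.length rfl hpc1
          have hm2 := pushChild_measure (f := f1) row.length rfl hpc2
          apply ih (PySem.Set.add visited j) r2 f2
            (by simp only [List.length_cons] at hk; omega) hvj ?_ ?_ htrue
          · intro x hx
            rcases pushChild_rnew hpc2 x hx with hx1 | ⟨rfl, hcw, _, hcnt, hc0, hcn, _⟩
            · rcases pushChild_rnew hpc1 x hx1 with hx2 | ⟨rfl, hcw, _, hcnt, hc0, hcn, _⟩
              · exact hr x hx2
              · exact ⟨⟨hc0, by omega⟩, RchFrom.step j _ hjrch hjint.1 hjint.2 (Or.inl rfl)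
                  (fun hx => hcw (hvj _ hx)) hc0 (by omega)⟩
            · exact ⟨⟨hc0, by omega⟩, RchFrom.step j _ hjrch hjint.1 hjint.2 (Or.inr rfl)
                (fun hx => hcw (hvj _ hx)) hc0 (by omega)⟩
          · intro x hx
            rcases pushChild_fnew hpc2 x hx with hx1 | hx1
            · rcases pushChild_fnew hpc1 x hx1 with hx2 | hx2
              · exact pushChild_rsub hpc2 _ (pushChild_rsub hpc1 _
                  (hf x (List.mem_cons_of_mem _ hx2)))
              · exact pushChild_rsub hpc2 _ hx2
            · exact hx1

theorem goB_nopath (row : List Int) (v0 : PySem.Set Int) :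
    ∀ k visited reach frontier,
      2 * unvisCnt row.length reach + frontier.length ≤ k →
      (∀ x, x ∈ v0 → x ∈ visited) →
      (∀ x, x ∈ visited → x ∈ v0 ∨ x ∈ reach) →
      (∀ x, x ∈ reach → 0 ≤ x ∧ x < (row.length : Int) - 1) →
      (∀ x, x ∈ frontier → x ∈ reach) →
      (∀ j, j ∈ reach → j ∉ frontier → ∀ c, (c = j - getI row j ∨ c = j + getI row j) →
          c ∈ visited ∨ c ∈ reach ∨ c < 0 ∨ (row.length : Int) ≤ c) →
      goB row visited reach frontier = false →
      ∀ x xs, x ∈ reach → okPath row v0 x xs → False := by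
  intro k
  induction k with
  | zero =>
    intro visited reach frontier hk hv hvr hint hf hclo hfalse x xs hx hok
    cases frontier with
    | nil =>
      exact closed_end row v0 visited reach hvr hint
        (fun j hj c hch => hclo j hj List.not_mem_nil c hch) x xs hx hok
    | cons j rest => simp only [List.length_cons] at hk; omega
  | succ k ih =>
    intro visited reach frontier hk hv hvr hint hf hclo hfalse x xs hx hok
    cases frontier with
    | nil =>
      exact closed_end row v0 visited reach hvr hint
        (fun j hj c hch => hclo j hj List.not_mem_nil c hch) x xs hx hok
    | cons j rest =>
      rw [goB] at hfalse
      have hjreach : j ∈ reach := hf j List.mem_cons_self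
      have hjint := hint j hjreach
      split at hfalse
      · exact absurd hfalse (by simp)
      · rename_i r1 f1 hpc1
        split at hfalse
        · exact absurd hfalse (by simp)
        · rename_i r2 f2 hpc2
          have hm1 := pushChild_measure (f := rest) row.length rfl hpc1
          have hm2 := pushChild_measure (f := f1) row.length rfl hpc2
          have hrsub : ∀ y, y ∈ reach → y ∈ r2 :=
            fun y hy => pushChild_rsub hpc2 _ (pushChild_rsub hpc1 _ hy)
          apply ih (PySem.Set.add visited j) r2 f2
            (by simp only [List.length_cons] at hk; omega) ?_ ?_ ?_ ?_ ?_ hfalse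
            x xs (hrsub x hx) hok
          · exact fun y hy => (PySem.Set.mem_add _ _ _).mpr (Or.inl (hv y hy))
          · intro y hy
            rcases (PySem.Set.mem_add _ _ _).mp hy with h | h
            · rcases hvr y h with h' | h'
              · exact Or.inl h'
              · exact Or.inr (hrsub y h')
            · rw [h]
              exact Or.inr (hrsub j hjreach)
          · intro y hy
            rcases pushChild_rnew hpc2 y hy with h | ⟨rfl, _, _, hcnt, hc0, hcn, _⟩
            · rcases pushChild_rnew hpc1 y h with h' | ⟨rfl, _, _, hcnt, hc0, hcn, _⟩
              · exact hint y h'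
              · exact ⟨hc0, by omega⟩
            · exact ⟨hc0, by omega⟩
          · intro y hy
            rcases pushChild_fnew hpc2 y hy with h | h
            · rcases pushChild_fnew hpc1 y h with h' | h'
              · exact hrsub y (hf y (List.mem_cons_of_mem _ h'))
              · exact pushChild_rsub hpc2 _ h'
            · exact h
          · intro j' hj' hnf c hch
            by_cases hjj : j' = j
            · subst hjj
              rcases hch with rfl | rfl
              · rcases pushChild_closed hpc1 with h | h | h | h
                · exact Or.inl h
                · exact Or.inr (Or.inl (pushChild_rsub hpc2 _ h))
                · exact Or.inr (Or.inr (Or.inl h))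
                · exact Or.inr (Or.inr (Or.inr h))
              · rcases pushChild_closed hpc2 with h | h | h | h
                · exact Or.inl h
                · exact Or.inr (Or.inl h)
                · exact Or.inr (Or.inr (Or.inl h))
                · exact Or.inr (Or.inr (Or.inr h))
            · rcases pushChild_rnew hpc2 j' hj' with hj'1 | ⟨rfl, _, _, _, _, _, hmf⟩
              · rcases pushChild_rnew hpc1 j' hj'1 with hj'2 | ⟨rfl, _, _, _, _, _, hmf⟩
                · by_cases hrest : j' ∈ rest
                  · exact absurd (pushChild_fsub hpc2 _ (pushChild_fsub hpc1 _ hrest)) hnf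
                  · have hold := hclo j' hj'2 (by
                      intro hmem
                      rcases List.mem_cons.mp hmem with h | h
                      · exact hjj h
                      · exact hrest h) c hch
                    rcases hold with h | h | h | h
                    · exact Or.inl ((PySem.Set.mem_add _ _ _).mpr (Or.inl h))
                    · exact Or.inr (Or.inl (hrsub c h))
                    · exact Or.inr (Or.inr (Or.inl h))
                    · exact Or.inr (Or.inr (Or.inr h))
                · exact absurd (pushChild_fsub hpc2 _ hmf) hnf
              · exact absurd hmf hnf

-- ===== VERDICT (by name: the statement is the Claim_ definition above) =====
theorem row_puzzle_rec_spec : Claim_equal_row_puzzle_rec := by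
  unfold Claim_equal_row_puzzle_rec Spec_row_puzzle_rec
  intro row i visited _
  unfold row_puzzle_rec row_puzzle_rec_alt
  by_cases h1 : i < 0 ∨ (row.length : Int) ≤ i
  · rw [if_pos h1]
    have he2 : row.length + 2 = (row.length + 1) + 1 := rfl
    rw [he2, goA_succ]
    rcases h1 with h | h
    · rw [if_pos h]
    · rw [if_neg (by omega : ¬ i < 0), if_pos h]
  · rw [if_neg h1]
    have h1a : ¬ i < 0 := fun h => h1 (Or.inl h)
    have h1b : ¬ (row.length : Int) ≤ i := fun h => h1 (Or.inr h)
    by_cases h2 : i = (row.length : Int) - 1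
    · rw [if_pos h2]
      exact goA_target row _ i _ (by omega) (by omega) h2
    · rw [if_neg h2]
      have hi0 : 0 ≤ i := by omega
      have hi1 : i < (row.length : Int) - 1 := by omega
      have hreach_elim : ∀ x, x ∈ PySem.Set.ofList [i] → x = i := by
        intro x hx
        have := (PySem.Set.mem_ofList _ _).mp hx
        simpa using this
      have hi_reach : i ∈ PySem.Set.ofList [i] := (PySem.Set.mem_ofList _ _).mpr (by simp)
      have hrinv : ∀ x, x ∈ PySem.Set.ofList [i] →
          (0 ≤ x ∧ x < (row.length : Int) - 1) ∧
          RchFrom row (PySem.Set.ofList visited) i x := by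
        intro x hx
        have := hreach_elim x hx
        subst this
        exact ⟨⟨hi0, hi1⟩, RchFrom.base⟩
      have hintinv : ∀ x, x ∈ PySem.Set.ofList [i] → 0 ≤ x ∧ x < (row.length : Int) - 1 := by
        intro x hx
        have := hreach_elim x hx
        subst this
        exact ⟨hi0, hi1⟩
      have hfinv : ∀ x, x ∈ ([i] : List Int) → x ∈ PySem.Set.ofList [i] := by
        intro x hx
        have : x = i := by simpa using hx
        subst this
        exact hi_reach
      have hcloinv : ∀ j, j ∈ PySem.Set.ofList [i] → j ∉ ([i] : List Int) →
          ∀ c, (c = j - getI row j ∨ c = j + getI row j) →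
            c ∈ PySem.Set.ofList visited ∨ c ∈ PySem.Set.ofList [i] ∨ c < 0 ∨
            (row.length : Int) ≤ c := by
        intro j hj hnf c hch
        exact absurd (by simp [hreach_elim j hj]) hnf
      have hmeas : 2 * unvisCnt row.length (PySem.Set.ofList [i]) + ([i] : List Int).length ≤
          2 * unvisCnt row.length (PySem.Set.ofList [i]) + 1 := by simp
      by_cases hA : (goA row (row.length + 2) i (PySem.Set.ofList visited)).1 = true
      · rcases goA_sound row _ i (PySem.Set.ofList visited) hA with ⟨xs, hxs⟩
        by_cases hB : goB row (PySem.Set.ofList visited) (PySem.Set.ofList [i]) [i] = true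
        · rw [hA, hB]
        · exfalso
          have hBf : goB row (PySem.Set.ofList visited) (PySem.Set.ofList [i]) [i] = false := by
            simpa using hB
          exact goB_nopath row (PySem.Set.ofList visited)
            (2 * unvisCnt row.length (PySem.Set.ofList [i]) + 1)
            (PySem.Set.ofList visited) (PySem.Set.ofList [i]) [i]
            hmeas (fun x hx => hx) (fun x hx => Or.inl hx)
            hintinv hfinv hcloinv hBf i xs hi_reach hxs
      · have hAf : (goA row (row.length + 2) i (PySem.Set.ofList visited)).1 = false := by
          simpa using hA
        have hnop := goA_false_nopath row i (PySem.Set.ofList visited) hi0 hi1 hAf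
        by_cases hB : goB row (PySem.Set.ofList visited) (PySem.Set.ofList [i]) [i] = true
        · exfalso
          rcases goB_sound row (PySem.Set.ofList visited) i
            (2 * unvisCnt row.length (PySem.Set.ofList [i]) + 1)
            (PySem.Set.ofList visited) (PySem.Set.ofList [i]) [i]
            hmeas (fun x hx => hx) hrinv hfinv hB with ⟨xs, hxs⟩
          exact hnop xs hxs
        · have hBf : goB row (PySem.Set.ofList visited) (PySem.Set.ofList [i]) [i] = false := by
            simpa using hB
          rw [hAf, hBf]
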